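-- pv_equiv track=rewrite | github.com/kli63/Distributed-Ray-Tracer | src/previz/clip.py | process_amc_data
-- ===== SOURCE A (Python) =====
-- def process_amc_data(lines, start_frame, speed_factor, desired_duration, frame_rate):
--     header = []
--     frame_data_started = False
--
--     # Identifying and separating the header
--     for line in lines:
--         if not line.strip().isdigit() and not frame_data_started:
--             header.append(line)
--         else:
--             frame_data_started = True
--             break
--
--     # i think this might be right depending on the frame rate, but we can probably default to the original 4346 given by 01_02.amc
--     # total_frames = int(desired_duration * frame_rate)
--     total_frames = 4346
--
--     processed_data = []
--     current_frame = 0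
--     frame_count = 0
--     skip_frame = False
--     # Start processing from where header ends
--     for line in lines[len(header):]:
--         # Check if the line is a frame number
--         if line.strip().isdigit():
--             frame_number = int(line.strip())
--             skip_frame = frame_number < start_frame or frame_count % speed_factor != 0
--             if not skip_frame:
--                 if current_frame < total_frames:
--                     # Update frame number
--                     processed_data.append(str(current_frame + 1) + '\n')
--                     current_frame += 1
--                 elif current_frame == total_frames:
--                     # Stop processing after completing the current frame
--                     break
--             frame_count += 1
--         elif not skip_frame and processed_data:
--             # Keep the data for the selected frames
--             processed_data.append(line)
--
--     return header, processed_data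
-- ===== SOURCE B (Python) =====
-- def process_amc_data(lines, start_frame, speed_factor, desired_duration, frame_rate):
--     n = len(lines)
--     # header = lines up to (excluding) the first digit-only line
--     h = 0
--     while h < n and not lines[h].strip().isdigit():
--         h += 1
--     header = lines[:h]
--     # parse the body once into blocks: (frame_number, data lines of that frame)
--     blocks = []
--     i = h
--     while i < n:
--         line = lines[i]
--         if line.strip().isdigit():
--             j = i + 1
--             while j < n and not lines[j].strip().isdigit():
--                 j += 1
--             blocks.append((int(line.strip()), lines[i + 1:j]))
--             i = j
--         else:
--             i += 1
--     total_frames = 4346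
--     processed_data = []
--     current_frame = 0
--     for frame_count, (frame_number, data) in enumerate(blocks):
--         if frame_number < start_frame or frame_count % speed_factor != 0:
--             continue
--         if current_frame < total_frames:
--             processed_data.append(str(current_frame + 1) + '\n')
--             processed_data.extend(data)
--             current_frame += 1
--         elif current_frame == total_frames:
--             break
--     return header, processed_data
-- ===== Notes on version B (the rewrite author's own statement) =====
-- stated objective: alternative
-- what changed: B first splits the input into header and a list of (frame_number, data_lines) blocks in one parsing pass, then renumbers by iterating blocks with enumerate, replacing A's single line-level loop that threads a persistent skip_frame flag across lines.
import Mathlib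
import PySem

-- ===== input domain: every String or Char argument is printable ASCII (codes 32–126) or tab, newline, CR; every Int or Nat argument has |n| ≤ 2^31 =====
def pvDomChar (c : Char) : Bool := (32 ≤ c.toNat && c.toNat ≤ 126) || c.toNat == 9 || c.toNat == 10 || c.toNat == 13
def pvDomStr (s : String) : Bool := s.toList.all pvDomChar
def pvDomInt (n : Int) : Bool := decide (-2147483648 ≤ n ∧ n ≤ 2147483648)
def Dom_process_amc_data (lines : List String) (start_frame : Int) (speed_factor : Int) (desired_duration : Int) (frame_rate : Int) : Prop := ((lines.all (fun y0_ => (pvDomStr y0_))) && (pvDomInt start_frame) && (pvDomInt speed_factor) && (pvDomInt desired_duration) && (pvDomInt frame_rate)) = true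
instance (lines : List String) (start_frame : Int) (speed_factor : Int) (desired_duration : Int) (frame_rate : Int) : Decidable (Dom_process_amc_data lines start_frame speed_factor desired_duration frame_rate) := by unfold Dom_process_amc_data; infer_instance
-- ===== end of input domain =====

-- B restructures A's single stateful line loop into header-split + one parse into (frame_number, data_lines) blocks + a block-level renumbering loop (objective: alternative decomposition, same cost).


-- shared by both ports: `line.strip().isdigit()` and `int(line.strip())`
def pvIsFrame (l : String) : Bool := PySem.Str.strIsdigit (PySem.Str.strip l)
def pvToInt (l : String) : Int := (PySem.Int.ofStr? (PySem.Str.strip l)).getD 0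

-- ===== PORT A =====
-- A's header loop (the `frame_data_started` flag is kept, as in the Python)
def pvHeaderA : Bool → List String → List String
  | _, [] => []
  | started, l :: ls =>
    if !pvIsFrame l && !started then l :: pvHeaderA started ls else []

-- A's processing loop over the body lines, state (current_frame, frame_count, skip_frame, processed_data)
def pvLoopA (start_frame speed_factor : Int) :
    List String → Int → Int → Bool → List String → List String
  | [], _, _, _, acc => acc
  | l :: ls, cf, fc, skip, acc =>
    if pvIsFrame l then
      let skip' : Bool := decide (pvToInt l < start_frame) || !(PySem.Int.mod fc speed_factor == 0)
      if skip' then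
        pvLoopA start_frame speed_factor ls cf (fc + 1) skip' acc
      else if cf < 4346 then
        pvLoopA start_frame speed_factor ls (cf + 1) (fc + 1) skip' (acc ++ [PySem.Int.toStr (cf + 1) ++ "\n"])
      else if cf = 4346 then
        acc  -- break
      else
        pvLoopA start_frame speed_factor ls cf (fc + 1) skip' acc
    else if !skip && !acc.isEmpty then
      pvLoopA start_frame speed_factor ls cf fc skip (acc ++ [l])
    else
      pvLoopA start_frame speed_factor ls cf fc skip acc

def process_amc_data (lines : List String) (start_frame : Int) (speed_factor : Int) (desired_duration : Int) (frame_rate : Int) : List String × List String :=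
  let header := pvHeaderA false lines
  (header, pvLoopA start_frame speed_factor (lines.drop header.length) 0 0 false [])

-- ===== PORT B =====
-- B's header scan (lines before the first digit line) and the remaining body
def pvHeaderB : List String → List String
  | [] => []
  | l :: ls => if !pvIsFrame l then l :: pvHeaderB ls else []

def pvBodyB : List String → List String
  | [] => []
  | l :: ls => if !pvIsFrame l then pvBodyB ls else l :: ls

-- B's single parsing pass: each digit line opens a block (frame_number, following data lines)
def pvParse : List String → List (Int × List String)
  | [] => []
  | l :: ls =>
    if pvIsFrame l then
      (pvToInt l, ls.takeWhile (fun x => !pvIsFrame x)) :: pvParse (ls.dropWhile (fun x => !pvIsFrame x))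
    else
      pvParse ls
termination_by ls => ls.length
decreasing_by
  · exact Nat.lt_succ_of_le (List.length_dropWhile_le _ _)
  · exact Nat.lt_succ_self _

-- B's renumbering loop over the blocks, state (frame_count, current_frame, processed_data)
def pvLoopB (start_frame speed_factor : Int) :
    List (Int × List String) → Int → Int → List String → List String
  | [], _, _, acc => acc
  | (fn, data) :: bs, fc, cf, acc =>
    if decide (fn < start_frame) || !(PySem.Int.mod fc speed_factor == 0) then
      pvLoopB start_frame speed_factor bs (fc + 1) cf acc
    else if cf < 4346 then
      pvLoopB start_frame speed_factor bs (fc + 1) (cf + 1) (acc ++ [PySem.Int.toStr (cf + 1) ++ "\n"] ++ data)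
    else if cf = 4346 then
      acc  -- break
    else
      pvLoopB start_frame speed_factor bs (fc + 1) cf acc

def process_amc_data_alt (lines : List String) (start_frame : Int) (speed_factor : Int) (desired_duration : Int) (frame_rate : Int) : List String × List String :=
  (pvHeaderB lines, pvLoopB start_frame speed_factor (pvParse (pvBodyB lines)) 0 0 [])

-- ===== PRECONDITION & SPEC =====
-- Pre_ excludes exactly the inputs on which A raises ZeroDivisionError: speed_factor = 0 together with
-- some digit line whose number is ≥ start_frame (only then does `or` short-circuiting reach `frame_count % speed_factor`).
def Pre_process_amc_data (lines : List String) (start_frame : Int) (speed_factor : Int) (desired_duration : Int) (frame_rate : Int) : Prop :=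
  speed_factor ≠ 0 ∨ ∀ l ∈ lines, pvIsFrame l = true → pvToInt l < start_frame
instance (lines : List String) (start_frame : Int) (speed_factor : Int) (desired_duration : Int) (frame_rate : Int) : Decidable (Pre_process_amc_data lines start_frame speed_factor desired_duration frame_rate) := by unfold Pre_process_amc_data; infer_instance

def pvWitness_process_amc_data : List String × Int × Int × Int × Int :=
  (["#comment", "1", "root 1 2", "2", "root 3 4"], 1, 1, 1, 120)

def Spec_process_amc_data (lines : List String) (start_frame : Int) (speed_factor : Int) (desired_duration : Int) (frame_rate : Int) (out : List String × List String) : Prop := out = process_amc_data_alt lines start_frame speed_factor desired_duration frame_rate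
instance (lines : List String) (start_frame : Int) (speed_factor : Int) (desired_duration : Int) (frame_rate : Int) (out : List String × List String) : Decidable (Spec_process_amc_data lines start_frame speed_factor desired_duration frame_rate out) := by unfold Spec_process_amc_data; infer_instance

-- ===== CLAIM (what is proved, stated in full; the proofs are below) =====
def Claim_equal_process_amc_data : Prop := ∀ (lines : List String) (start_frame : Int) (speed_factor : Int) (desired_duration : Int) (frame_rate : Int), Dom_process_amc_data lines start_frame speed_factor desired_duration frame_rate → Pre_process_amc_data lines start_frame speed_factor desired_duration frame_rate → Spec_process_amc_data lines start_frame speed_factor desired_duration frame_rate (process_amc_data lines start_frame speed_factor desired_duration frame_rate)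

-- ===== LEMMAS AND PROOFS =====

-- the two header scans agree
theorem headerA_eq_headerB (lines : List String) : pvHeaderA false lines = pvHeaderB lines := by
  induction lines with
  | nil => rfl
  | cons l ls ih => simp [pvHeaderA, pvHeaderB, ih]

-- dropping the header's length yields B's body
theorem drop_headerB (lines : List String) :
    lines.drop (pvHeaderB lines).length = pvBodyB lines := by
  induction lines with
  | nil => rfl
  | cons l ls ih =>
    by_cases h : pvIsFrame l
    · simp [pvHeaderB, pvBodyB, h]
    · simp [pvHeaderB, pvBodyB, h, ih]

-- the body produced by B's header split starts with a frame line (or is empty)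
theorem body_good (lines : List String) :
    ∀ x xs, pvBodyB lines = x :: xs → pvIsFrame x = true := by
  induction lines with
  | nil => intro x xs h; simp [pvBodyB] at h
  | cons l ls ih =>
    intro x xs h
    rw [pvBodyB] at h
    by_cases hl : pvIsFrame l = true
    · simp [hl] at h
      exact h.1 ▸ hl
    · simp only [Bool.not_eq_true] at hl
      simp [hl] at h
      exact ih x xs h

-- with skip_frame = true, A passes over a run of non-frame lines unchanged
theorem loopA_skip_run (s f : Int) (run rest : List String)
    (h : ∀ x ∈ run, pvIsFrame x = false) (cf fc : Int) (acc : List String) :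
    pvLoopA s f (run ++ rest) cf fc true acc = pvLoopA s f rest cf fc true acc := by
  induction run with
  | nil => rfl
  | cons r rs ih =>
    have hr : pvIsFrame r = false := h r (by simp)
    simp only [List.cons_append, pvLoopA, hr]
    simp [ih (fun x hx => h x (by simp [hx]))]

-- with skip_frame = false and nonempty output, A appends a run of non-frame lines
theorem loopA_keep_run (s f : Int) (run rest : List String)
    (h : ∀ x ∈ run, pvIsFrame x = false) (cf fc : Int) (acc : List String) (hacc : acc ≠ []) :
    pvLoopA s f (run ++ rest) cf fc false acc = pvLoopA s f rest cf fc false (acc ++ run) := by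
  induction run generalizing acc with
  | nil => simp
  | cons r rs ih =>
    have hr : pvIsFrame r = false := h r (by simp)
    simp only [List.cons_append, pvLoopA, hr]
    have hacc' : acc.isEmpty = false := by simpa [List.isEmpty_iff] using hacc
    simp only [hacc', Bool.not_false, Bool.and_self]
    rw [ih (fun x hx => h x (by simp [hx])) (acc ++ [r]) (by simp)]
    simp

-- main correspondence: A's line loop on a block-aligned body equals B's block loop on the parse
theorem loop_main (s f : Int) :
    ∀ n (body : List String), body.length ≤ n →
    (∀ x xs, body = x :: xs → pvIsFrame x = true) →
    ∀ (cf fc : Int) (skip : Bool) (acc : List String), cf ≤ 4346 →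
    pvLoopA s f body cf fc skip acc = pvLoopB s f (pvParse body) fc cf acc := by
  intro n
  induction n with
  | zero =>
    intro body hlen _ cf fc skip acc _
    have hnil : body = [] := List.eq_nil_of_length_eq_zero (Nat.le_zero.mp hlen)
    subst hnil
    simp [pvLoopA, pvParse, pvLoopB]
  | succ n ih =>
    intro body hlen hgood cf fc skip acc hcf
    cases body with
    | nil => simp [pvLoopA, pvParse, pvLoopB]
    | cons l ls =>
      have hl : pvIsFrame l = true := hgood l ls rfl
      set tw := ls.takeWhile (fun x => !pvIsFrame x) with htw
      set dw := ls.dropWhile (fun x => !pvIsFrame x) with hdw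
      have hsplit : ls = tw ++ dw := (List.takeWhile_append_dropWhile).symm
      have htwmem : ∀ x ∈ tw, pvIsFrame x = false := by
        intro x hx
        have := List.mem_takeWhile_imp hx
        simpa using this
      have hdwgood : ∀ x xs, dw = x :: xs → pvIsFrame x = true := by
        intro x xs hx
        have h2 : ¬ (!pvIsFrame x) = true := by
          have h1 := List.head?_dropWhile_not (fun y => !pvIsFrame y) ls
          rw [← hdw, hx] at h1
          simpa using h1
        simpa using h2
      have hdwlen : dw.length ≤ n := by
        have h1 : dw.length ≤ ls.length := List.length_dropWhile_le _ _
        simp at hlen; omega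
      have hparse : pvParse (l :: ls) = (pvToInt l, tw) :: pvParse dw := by
        rw [pvParse]; simp [hl, ← htw, ← hdw]
      rw [hparse, show (l :: ls) = l :: (tw ++ dw) from by rw [← hsplit]]
      simp only [pvLoopA, pvLoopB, hl, if_true]
      by_cases hskip : (decide (pvToInt l < s) || !(PySem.Int.mod fc f == 0)) = true
      · rw [if_pos hskip, if_pos hskip, hskip, loopA_skip_run s f tw dw htwmem]
        exact ih dw hdwlen hdwgood cf (fc + 1) _ acc hcf
      · have hfalse : (decide (pvToInt l < s) || !(PySem.Int.mod fc f == 0)) = false :=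
          Bool.not_eq_true _ ▸ hskip
        rw [if_neg hskip, if_neg hskip, hfalse]
        by_cases hlt : cf < 4346
        · rw [if_pos hlt, if_pos hlt,
            loopA_keep_run s f tw dw htwmem _ _ _ (by simp),
            ih dw hdwlen hdwgood (cf + 1) (fc + 1) _ _ (by omega),
            List.append_assoc]
        · have heq : cf = 4346 := by omega
          rw [if_neg hlt, if_neg hlt, if_pos heq, if_pos heq]

-- ===== VERDICT (by name: the statement is the Claim_ definition above) =====
theorem process_amc_data_spec : Claim_equal_process_amc_data := by
  intro lines s f dd fr _ _
  unfold Spec_process_amc_data process_amc_data process_amc_data_alt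
  simp only [headerA_eq_headerB, drop_headerB]
  exact Prod.ext rfl
    (loop_main s f (pvBodyB lines).length (pvBodyB lines) le_rfl (body_good lines) 0 0 false [] (by norm_num))
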